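-- pv_equiv track=rewrite | github.com/MarketingReseacher/Price-increase-justifications | marketing_score.py | _filter_dict_by_firm_mention
-- ===== SOURCE A (Python) =====
-- def _filter_dict_by_firm_mention(expanded_dict, firm_mention_counts, min_firms=20):
--     """
--     Filters the expanded dictionary by firm mention frequency.
--
--     Args:
--         expanded_dict (dict): Expanded dictionary to filter.
--         firm_mention_counts (dict): Dictionary of firm mention counts.
--         min_firms (int): Minimum number of firms for a word to be included.
--
--     Returns:
--         tuple: A tuple containing the filtered expanded dictionary and a dictionary of excluded words.
--     """
--     high_freq_ws = [
--         w for w in firm_mention_counts if firm_mention_counts[w] >= min_firms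
--     ]
--     low_freq_ws = [w for w in firm_mention_counts if firm_mention_counts[w] < min_firms]
--
--     high_freq_ws = set(high_freq_ws)
--     low_freq_ws = set(low_freq_ws)
--     filtered_dict = {}
--     for dim in expanded_dict:
--         filtered_dict[dim] = set(expanded_dict[dim]).intersection(low_freq_ws)
--
--     # filter by firm mention
--     for dim in expanded_dict:
--         expanded_dict[dim] = set(expanded_dict[dim]).intersection(high_freq_ws)
--
--     return expanded_dict, filtered_dict
-- ===== SOURCE B (Python) =====
-- def _filter_dict_by_firm_mention(expanded_dict, firm_mention_counts, min_firms=20):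
--     """Single pass per dimension: classify each distinct word on the fly via a
--     dict lookup instead of precomputing two global high/low frequency sets and
--     intersecting twice.  Mutates expanded_dict in place like the original."""
--     filtered_dict = {}
--     for dim, words in expanded_dict.items():
--         high, low = set(), set()
--         for w in set(words):
--             if w in firm_mention_counts:
--                 if firm_mention_counts[w] >= min_firms:
--                     high.add(w)
--                 else:
--                     low.add(w)
--         filtered_dict[dim] = low
--         expanded_dict[dim] = high
--     return expanded_dict, filtered_dict
-- ===== Notes on version B (the rewrite author's own statement) =====
-- stated objective: alternative
-- what changed: Instead of precomputing two global high/low frequency sets from firm_mention_counts and intersecting every dimension's word set with each, B makes a single pass per dimension over the distinct words, classifying each word by one dict lookup into a per-dimension high or low set.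
import Mathlib
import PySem

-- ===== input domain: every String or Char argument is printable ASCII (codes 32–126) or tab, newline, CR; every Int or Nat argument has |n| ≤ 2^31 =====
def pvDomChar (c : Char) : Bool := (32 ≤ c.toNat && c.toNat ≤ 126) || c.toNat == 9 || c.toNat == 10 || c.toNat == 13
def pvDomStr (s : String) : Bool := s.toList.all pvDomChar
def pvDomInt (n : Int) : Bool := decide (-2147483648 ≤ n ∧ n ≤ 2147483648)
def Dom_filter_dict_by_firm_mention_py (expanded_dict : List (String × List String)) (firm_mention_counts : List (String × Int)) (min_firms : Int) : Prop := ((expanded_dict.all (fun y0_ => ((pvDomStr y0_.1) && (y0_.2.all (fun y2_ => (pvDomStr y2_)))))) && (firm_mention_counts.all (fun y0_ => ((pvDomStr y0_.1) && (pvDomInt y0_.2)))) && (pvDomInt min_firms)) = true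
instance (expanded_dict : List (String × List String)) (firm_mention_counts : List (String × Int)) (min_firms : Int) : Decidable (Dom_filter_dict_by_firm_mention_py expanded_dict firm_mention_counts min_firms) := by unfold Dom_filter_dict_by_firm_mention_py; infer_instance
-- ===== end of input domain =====

-- B classifies each dimension's distinct words in one pass via a dict lookup, instead of A's two
-- precomputed global high/low frequency sets intersected with every dimension (alternative decomposition).
-- Both Pythons mutate expanded_dict in place identically; the equivalence proved is about the return value.

-- ===== PORT A =====
def filter_dict_by_firm_mention_py (expanded_dict : List (String × List String)) (firm_mention_counts : List (String × Int)) (min_firms : Int) : (List (String × List String)) × (List (String × List String)) :=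
  let ed : PySem.Dict String (List String) := PySem.Dict.mk expanded_dict
  let counts : PySem.Dict String Int := PySem.Dict.mk firm_mention_counts
  -- firm_mention_counts[w] for w a key of the dict: getD with default 0 is exact (the key is present)
  let high_freq_ws : PySem.Set String :=
    PySem.Set.ofList (counts.keys.filter (fun w => decide (min_firms ≤ counts.getD w 0)))
  let low_freq_ws : PySem.Set String :=
    PySem.Set.ofList (counts.keys.filter (fun w => decide (counts.getD w 0 < min_firms)))
  let filtered : PySem.Dict String (List String) :=
    ed.keys.foldl
      (fun d dim => d.insert dim (PySem.Set.inter (PySem.Set.ofList (ed.getD dim [])) low_freq_ws))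
      PySem.Dict.empty
  let ed2 : PySem.Dict String (List String) :=
    ed.keys.foldl
      (fun d dim => d.insert dim (PySem.Set.inter (PySem.Set.ofList (d.getD dim [])) high_freq_ws))
      ed
  (ed2.items, filtered.items)

-- ===== PORT B =====
-- one step of B's inner loop: classify word w into the (high, low) pair of sets
def pvPartitionStep (counts : PySem.Dict String Int) (min_firms : Int)
    (hl : PySem.Set String × PySem.Set String) (w : String) :
    PySem.Set String × PySem.Set String :=
  match counts.get? w with
  | some c => if min_firms ≤ c then (PySem.Set.add hl.1 w, hl.2) else (hl.1, PySem.Set.add hl.2 w)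
  | none => hl

def filter_dict_by_firm_mention_py_alt (expanded_dict : List (String × List String)) (firm_mention_counts : List (String × Int)) (min_firms : Int) : (List (String × List String)) × (List (String × List String)) :=
  let counts : PySem.Dict String Int := PySem.Dict.mk firm_mention_counts
  -- for dim, words in expanded_dict.items(): one pass over set(words), then append to both result
  -- dicts (overwriting expanded_dict[dim] / inserting fresh filtered_dict[dim] appends, keys being unique by Pre_)
  expanded_dict.foldl
    (fun acc p =>
      let hl := (PySem.Set.ofList p.2).foldl (pvPartitionStep counts min_firms)
                  (PySem.Set.empty, PySem.Set.empty)
      (acc.1 ++ [(p.1, hl.1)], acc.2 ++ [(p.1, hl.2)]))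
    ([], [])

-- ===== PRECONDITION & SPEC =====
-- Pre_ only requires the dimension keys of expanded_dict to be distinct: the Python argument is a
-- dict, whose keys are always distinct, so a duplicate-key association list corresponds to no Python
-- input; it excludes nothing A can actually be called on.
def Pre_filter_dict_by_firm_mention_py (expanded_dict : List (String × List String)) (firm_mention_counts : List (String × Int)) (min_firms : Int) : Prop :=
  (expanded_dict.map Prod.fst).Nodup

instance (expanded_dict : List (String × List String)) (firm_mention_counts : List (String × Int)) (min_firms : Int) : Decidable (Pre_filter_dict_by_firm_mention_py expanded_dict firm_mention_counts min_firms) := by unfold Pre_filter_dict_by_firm_mention_py; infer_instance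

def pvWitness_filter_dict_by_firm_mention_py : (List (String × List String)) × (List (String × Int)) × Int :=
  ([("d1", ["a", "b", "a"]), ("d2", ["c"])], [("a", (3 : Int)), ("c", 1)], 2)

def Spec_filter_dict_by_firm_mention_py (expanded_dict : List (String × List String)) (firm_mention_counts : List (String × Int)) (min_firms : Int) (out : (List (String × List String)) × (List (String × List String))) : Prop := out = filter_dict_by_firm_mention_py_alt expanded_dict firm_mention_counts min_firms
instance (expanded_dict : List (String × List String)) (firm_mention_counts : List (String × Int)) (min_firms : Int) (out : (List (String × List String)) × (List (String × List String))) : Decidable (Spec_filter_dict_by_firm_mention_py expanded_dict firm_mention_counts min_firms out) := by unfold Spec_filter_dict_by_firm_mention_py; infer_instance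

-- ===== CLAIM (what is proved, stated in full; the proofs are below) =====
def Claim_equal_filter_dict_by_firm_mention_py : Prop := ∀ (expanded_dict : List (String × List String)) (firm_mention_counts : List (String × Int)) (min_firms : Int), Dom_filter_dict_by_firm_mention_py expanded_dict firm_mention_counts min_firms → Pre_filter_dict_by_firm_mention_py expanded_dict firm_mention_counts min_firms → Spec_filter_dict_by_firm_mention_py expanded_dict firm_mention_counts min_firms (filter_dict_by_firm_mention_py expanded_dict firm_mention_counts min_firms)

-- ===== LEMMAS AND PROOFS =====

-- the per-word classification predicates realised by B's inner loop
def pvHighP (counts : PySem.Dict String Int) (m : Int) (w : String) : Bool :=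
  match counts.get? w with | some c => decide (m ≤ c) | none => false
def pvLowP (counts : PySem.Dict String Int) (m : Int) (w : String) : Bool :=
  match counts.get? w with | some c => decide (c < m) | none => false

-- membership in A's global frequency sets = the per-word predicate on the dict lookup
lemma pv_contains_filter_keys (counts : PySem.Dict String Int) (p : Int → Bool) (w : String) :
    (PySem.Set.ofList (counts.keys.filter (fun k => p (counts.getD k 0)))).contains w
      = (match counts.get? w with | some c => p c | none => false) := by
  cases hc : counts.get? w with
  | none =>
    have hk : w ∉ counts.keys := (PySem.Dict.get?_eq_none_iff_not_mem_keys counts w).mp hc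
    rw [Bool.eq_iff_iff]
    simp [PySem.Set.contains_iff, PySem.Set.mem_ofList, List.mem_filter, hk]
  | some c =>
    have hk : w ∈ counts.keys :=
      PySem.Dict.mem_keys_of_mem_items counts (PySem.Dict.mem_items_of_get?_eq_some counts hc)
    have hgd : counts.getD w 0 = c := by rw [PySem.Dict.getD_eq_get?_getD, hc]; rfl
    rw [Bool.eq_iff_iff]
    simp [PySem.Set.contains_iff, PySem.Set.mem_ofList, List.mem_filter, hk, hgd]

-- B's inner loop over a duplicate-free word list splits it into the two filters, in order
lemma pv_partition_foldl (counts : PySem.Dict String Int) (m : Int) :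
    ∀ (ws : List String) (h l : PySem.Set String), ws.Nodup →
      (∀ x ∈ ws, x ∉ h) → (∀ x ∈ ws, x ∉ l) →
      ws.foldl (pvPartitionStep counts m) (h, l)
        = (h ++ ws.filter (pvHighP counts m), l ++ ws.filter (pvLowP counts m)) := by
  intro ws
  induction ws with
  | nil => intro h l _ _ _; simp
  | cons w ws ih =>
    intro h l hnd hh hl
    have hwh : w ∉ h := hh w (by simp)
    have hwl : w ∉ l := hl w (by simp)
    have hwws : w ∉ ws := (List.nodup_cons.mp hnd).1
    have hnd' : ws.Nodup := (List.nodup_cons.mp hnd).2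
    simp only [List.foldl_cons, List.filter_cons]
    cases hc : counts.get? w with
    | none =>
      have hstep : pvPartitionStep counts m (h, l) w = (h, l) := by
        simp [pvPartitionStep, hc]
      have hH : pvHighP counts m w = false := by simp [pvHighP, hc]
      have hL : pvLowP counts m w = false := by simp [pvLowP, hc]
      rw [hstep, ih h l hnd' (fun x hx => hh x (by simp [hx])) (fun x hx => hl x (by simp [hx]))]
      simp [hH, hL]
    | some c =>
      by_cases hm : m ≤ c
      · have hstep : pvPartitionStep counts m (h, l) w = (h ++ [w], l) := by
          simp [pvPartitionStep, hc, hm, PySem.Set.add_of_not_mem hwh]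
        have hH : pvHighP counts m w = true := by simp [pvHighP, hc, hm]
        have hL : pvLowP counts m w = false := by simp [pvLowP, hc, not_lt.mpr hm]
        rw [hstep, ih (h ++ [w]) l hnd'
          (fun x hx => by
            simp only [List.mem_append, List.mem_singleton]
            rintro (hxh | rfl)
            · exact hh x (by simp [hx]) hxh
            · exact hwws hx)
          (fun x hx => hl x (by simp [hx]))]
        simp [hH, hL]
      · have hstep : pvPartitionStep counts m (h, l) w = (h, l ++ [w]) := by
          simp [pvPartitionStep, hc, hm, PySem.Set.add_of_not_mem hwl]
        have hH : pvHighP counts m w = false := by simp [pvHighP, hc, hm]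
        have hL : pvLowP counts m w = true := by simp [pvLowP, hc, lt_of_not_ge hm]
        rw [hstep, ih h (l ++ [w]) hnd'
          (fun x hx => hh x (by simp [hx]))
          (fun x hx => by
            simp only [List.mem_append, List.mem_singleton]
            rintro (hxl | rfl)
            · exact hl x (by simp [hx]) hxl
            · exact hwws hx)]
        simp [hH, hL]

-- A's second loop: updating every key of a duplicate-free dict in place maps F over the values
lemma pv_items_foldl_update (F : List String → List String) :
    ∀ (ks : List String) (d : PySem.Dict String (List String)),
      d.keys.Nodup → ks.Nodup → (∀ k ∈ ks, d.contains k = true) →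
      (ks.foldl (fun d k => d.insert k (F (d.getD k []))) d).items
        = d.items.map (fun p => if p.1 ∈ ks then (p.1, F p.2) else p) := by
  intro ks
  induction ks with
  | nil => intro d _ _ _; simp
  | cons k ks ih =>
    intro d hnd hndks hall
    have hc : d.contains k = true := hall k (by simp)
    have hkks : k ∉ ks := (List.nodup_cons.mp hndks).1
    have hndks' : ks.Nodup := (List.nodup_cons.mp hndks).2
    simp only [List.foldl_cons]
    have hkeys' : (d.insert k (F (d.getD k []))).keys = d.keys :=
      PySem.Dict.keys_insert_of_contains d _ hc
    have hall' : ∀ k' ∈ ks, (d.insert k (F (d.getD k []))).contains k' = true := by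
      intro k' hk'
      rw [PySem.Dict.contains_insert, hall k' (by simp [hk'])]
      simp
    rw [ih (d.insert k (F (d.getD k []))) (hkeys' ▸ hnd) hndks' hall']
    rw [PySem.Dict.items_insert_of_contains d _ hc, List.map_map]
    apply List.map_congr_left
    intro p hp
    by_cases hpk : p.1 = k
    · have hgd : d.getD k [] = p.2 := by
        have hpair : (k, p.2) ∈ d.items := by rw [← hpk]; exact hp
        exact PySem.Dict.getD_of_mem_items d hpair hnd []
      simp [Function.comp, hpk, hgd, hkks]
    · simp [Function.comp, hpk, List.mem_cons]

-- B's outer loop with two appending accumulators is a pair of maps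
lemma pv_foldl_two_append (f g : String × List String → String × List String) :
    ∀ (l : List (String × List String)) (a b : List (String × List String)),
      l.foldl (fun acc p => (acc.1 ++ [f p], acc.2 ++ [g p])) (a, b)
        = (a ++ l.map f, b ++ l.map g) := by
  intro l
  induction l with
  | nil => intro a b; simp
  | cons p l ih => intro a b; simp [ih]

-- A's first loop over fresh distinct keys builds the dict whose items map each entry
lemma pv_filtered_items (ed : List (String × List String)) (low : PySem.Set String)
    (hnd : (ed.map Prod.fst).Nodup) :
    ((PySem.Dict.mk ed).keys.foldl
        (fun d dim => d.insert dim (PySem.Set.inter (PySem.Set.ofList ((PySem.Dict.mk ed).getD dim [])) low))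
        PySem.Dict.empty).items
      = ed.map (fun p => (p.1, PySem.Set.inter (PySem.Set.ofList p.2) low)) := by
  have hkeys : (PySem.Dict.mk ed).keys = ed.map Prod.fst := by
    simp [PySem.Dict.keys_mk, Prod.fst]
  have hndk : (PySem.Dict.mk ed).keys.Nodup := by rw [hkeys]; exact hnd
  rw [PySem.Dict.items_foldl_insert_fresh (PySem.Dict.mk ed).keys (fun a => a)
      (fun dim => PySem.Set.inter (PySem.Set.ofList ((PySem.Dict.mk ed).getD dim [])) low)
      PySem.Dict.empty (fun a _ => PySem.Dict.contains_empty a) (by simpa using hndk)]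
  rw [hkeys]
  simp only [PySem.Dict.empty, List.nil_append, List.map_map]
  apply List.map_congr_left
  intro p hp
  have hgd : (PySem.Dict.mk ed).getD p.1 [] = p.2 :=
    PySem.Dict.getD_of_mem_items (PySem.Dict.mk ed) (by exact hp) hndk []
  simp [Function.comp, hgd]

theorem filter_dict_by_firm_mention_py_spec : Claim_equal_filter_dict_by_firm_mention_py := by
  intro ed fmc m _ hpre
  unfold Pre_filter_dict_by_firm_mention_py at hpre
  unfold Spec_filter_dict_by_firm_mention_py
  unfold filter_dict_by_firm_mention_py filter_dict_by_firm_mention_py_alt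
  simp only []
  set counts : PySem.Dict String Int := PySem.Dict.mk fmc with hcounts
  set high : PySem.Set String :=
    PySem.Set.ofList (counts.keys.filter (fun w => decide (m ≤ counts.getD w 0))) with hhigh
  set low : PySem.Set String :=
    PySem.Set.ofList (counts.keys.filter (fun w => decide (counts.getD w 0 < m))) with hlow
  have hkeys : (PySem.Dict.mk ed).keys = ed.map Prod.fst := by
    simp [PySem.Dict.keys_mk, Prod.fst]
  have hndk : (PySem.Dict.mk ed).keys.Nodup := by rw [hkeys]; exact hpre
  -- characterise the two global sets pointwise
  have hHcont : ∀ w, high.contains w = pvHighP counts m w := by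
    intro w
    rw [hhigh, pv_contains_filter_keys counts (fun c => decide (m ≤ c)) w]
    rfl
  have hLcont : ∀ w, low.contains w = pvLowP counts m w := by
    intro w
    rw [hlow, pv_contains_filter_keys counts (fun c => decide (c < m)) w]
    rfl
  have hinterH : ∀ v : List String,
      PySem.Set.inter (PySem.Set.ofList v) high = (PySem.Set.ofList v).filter (pvHighP counts m) := by
    intro v
    show (PySem.Set.ofList v).filter (fun x => high.contains x) = _
    exact List.filter_congr (fun x _ => hHcont x)
  have hinterL : ∀ v : List String,
      PySem.Set.inter (PySem.Set.ofList v) low = (PySem.Set.ofList v).filter (pvLowP counts m) := by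
    intro v
    show (PySem.Set.ofList v).filter (fun x => low.contains x) = _
    exact List.filter_congr (fun x _ => hLcont x)
  -- A's two loops
  have hA2 : ((PySem.Dict.mk ed).keys.foldl
      (fun d dim => d.insert dim (PySem.Set.inter (PySem.Set.ofList (d.getD dim [])) high))
      (PySem.Dict.mk ed)).items
      = ed.map (fun p => (p.1, PySem.Set.inter (PySem.Set.ofList p.2) high)) := by
    rw [pv_items_foldl_update (fun v => PySem.Set.inter (PySem.Set.ofList v) high)
        (PySem.Dict.mk ed).keys (PySem.Dict.mk ed) hndk hndk
        (fun k hk => (PySem.Dict.contains_iff_mem_keys (PySem.Dict.mk ed) k).mpr hk)]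
    apply List.map_congr_left
    intro p hp
    have hpk : p.1 ∈ (PySem.Dict.mk ed).keys := PySem.Dict.mem_keys_of_mem_items (PySem.Dict.mk ed) hp
    rw [if_pos hpk]
  have hA1 := pv_filtered_items ed low hpre
  -- B's loop
  have hBstep : ∀ p : String × List String,
      (PySem.Set.ofList p.2).foldl (pvPartitionStep counts m) (PySem.Set.empty, PySem.Set.empty)
        = ((PySem.Set.ofList p.2).filter (pvHighP counts m),
           (PySem.Set.ofList p.2).filter (pvLowP counts m)) := by
    intro p
    rw [pv_partition_foldl counts m (PySem.Set.ofList p.2) PySem.Set.empty PySem.Set.empty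
        (PySem.Set.nodup_ofList p.2) (by intro x _ hx; simp [PySem.Set.empty] at hx)
        (by intro x _ hx; simp [PySem.Set.empty] at hx)]
    simp [PySem.Set.empty]
  have hB := pv_foldl_two_append
      (fun p => (p.1, (PySem.Set.ofList p.2).filter (pvHighP counts m)))
      (fun p => (p.1, (PySem.Set.ofList p.2).filter (pvLowP counts m))) ed [] []
  calc (((PySem.Dict.mk ed).keys.foldl
          (fun d dim => d.insert dim (PySem.Set.inter (PySem.Set.ofList (d.getD dim [])) high))
          (PySem.Dict.mk ed)).items,
        ((PySem.Dict.mk ed).keys.foldl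
          (fun d dim => d.insert dim (PySem.Set.inter (PySem.Set.ofList ((PySem.Dict.mk ed).getD dim [])) low))
          PySem.Dict.empty).items)
      = (ed.map (fun p => (p.1, (PySem.Set.ofList p.2).filter (pvHighP counts m))),
         ed.map (fun p => (p.1, (PySem.Set.ofList p.2).filter (pvLowP counts m)))) := by
        rw [hA2, hA1]
        exact congrArg₂ Prod.mk
          (List.map_congr_left (fun p _ => by rw [hinterH p.2]))
          (List.map_congr_left (fun p _ => by rw [hinterL p.2]))
    _ = ed.foldl
          (fun acc p =>
            let hl := (PySem.Set.ofList p.2).foldl (pvPartitionStep counts m)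
                        (PySem.Set.empty, PySem.Set.empty)
            (acc.1 ++ [(p.1, hl.1)], acc.2 ++ [(p.1, hl.2)]))
          ([], []) := by
        rw [show (fun (acc : List (String × List String) × List (String × List String)) (p : String × List String) =>
              let hl := (PySem.Set.ofList p.2).foldl (pvPartitionStep counts m)
                          (PySem.Set.empty, PySem.Set.empty)
              (acc.1 ++ [(p.1, hl.1)], acc.2 ++ [(p.1, hl.2)]))
            = (fun acc p =>
              (acc.1 ++ [(p.1, ((PySem.Set.ofList p.2).filter (pvHighP counts m)))],
               acc.2 ++ [(p.1, ((PySem.Set.ofList p.2).filter (pvLowP counts m)))])) from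
            funext fun acc => funext fun p => by simp only [hBstep p]]
        rw [hB]
        simp
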